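-- pv_equiv track=rewrite | github.com/nguyenduongminhhoang/Sentiment-Analysis-3 | GUI_final.py | find_words_list
-- ===== SOURCE A (Python) =====
-- def find_words_list(document, list_of_words):
--     document_lower = document.lower().replace("_"," ")
--     word_count = 0
--     word_list = []
--
--     for word in list_of_words:
--         if word in document_lower:
--             word_count += document_lower.count(word)
--             word_list.append(word)
--     return word_list
-- ===== SOURCE B (Python) =====
-- def find_words_list(document, list_of_words):
--     doc = document.lower().replace("_", " ")
--     n = len(doc)
--     windows = {}
--     for word in list_of_words:
--         k = len(word)
--         if k not in windows:
--             windows[k] = {doc[i:i + k] for i in range(n - k + 1)}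
--     return [w for w in list_of_words if w in windows[len(w)]]
-- ===== Notes on version B (the rewrite author's own statement) =====
-- stated objective: faster
-- what changed: Instead of running a substring scan of the document for every word, B builds one hash set of all document windows per distinct word length (cached in a dict) and filters the word list by set membership.
import Mathlib
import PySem

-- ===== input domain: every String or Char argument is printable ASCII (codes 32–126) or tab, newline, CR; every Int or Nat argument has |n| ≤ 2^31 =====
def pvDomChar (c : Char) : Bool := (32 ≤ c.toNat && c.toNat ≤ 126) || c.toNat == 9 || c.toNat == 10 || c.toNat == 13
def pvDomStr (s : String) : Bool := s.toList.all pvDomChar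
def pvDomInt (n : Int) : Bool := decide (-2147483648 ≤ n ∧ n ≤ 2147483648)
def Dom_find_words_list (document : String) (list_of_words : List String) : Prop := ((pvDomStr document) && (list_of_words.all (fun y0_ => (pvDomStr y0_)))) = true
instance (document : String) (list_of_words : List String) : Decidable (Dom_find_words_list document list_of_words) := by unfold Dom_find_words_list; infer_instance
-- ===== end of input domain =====

-- B replaces the per-word substring scan by one set of length-k windows of the document per
-- distinct word length, cached in a dict, then a membership filter; measurably faster (one document pass per distinct word length).

-- ===== PORT A =====
def find_words_list (document : String) (list_of_words : List String) : List String :=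
  let document_lower := PySem.Str.replace (PySem.Str.lower document) "_" " "
  -- state = (word_count, word_list); word_count is computed (and unused) exactly as in A
  let st := list_of_words.foldl
    (fun (st : Int × List String) word =>
      if PySem.Str.isIn word document_lower then
        (st.1 + (PySem.Str.count document_lower word : Int), st.2 ++ [word])
      else st)
    ((0 : Int), ([] : List String))
  st.2

-- ===== PORT B =====
-- {doc[i:i+k] for i in range(len(doc) - k + 1)}
def pvWindowSet (doc : String) (k : Int) : PySem.Set String :=
  PySem.Set.ofList ((PySem.List.pyRange 0 (PySem.Str.len doc - k + 1) 1).map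
    (fun i => PySem.Str.slice doc (some i) (some (i + k))))

def find_words_list_alt (document : String) (list_of_words : List String) : List String :=
  let doc := PySem.Str.replace (PySem.Str.lower document) "_" " "
  let windows := list_of_words.foldl
    (fun (d : PySem.Dict Int (PySem.Set String)) word =>
      let k : Int := PySem.Str.len word
      if d.contains k then d else d.insert k (pvWindowSet doc k))
    PySem.Dict.empty
  -- windows[len(w)]: the key is always present (it was inserted while scanning the list),
  -- so Python's lookup never raises; getD with an empty-set default is its total rendering
  list_of_words.filter (fun w =>
    PySem.Set.contains ((windows.get? (PySem.Str.len w)).getD PySem.Set.empty) w)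

-- ===== PRECONDITION & SPEC =====
def Spec_find_words_list (document : String) (list_of_words : List String) (out : List String) : Prop := out = find_words_list_alt document list_of_words
instance (document : String) (list_of_words : List String) (out : List String) : Decidable (Spec_find_words_list document list_of_words out) := by unfold Spec_find_words_list; infer_instance

-- ===== CLAIM (what is proved, stated in full; the proofs are below) =====
def Claim_equal_find_words_list : Prop := ∀ (document : String) (list_of_words : List String), Dom_find_words_list document list_of_words → Spec_find_words_list document list_of_words (find_words_list document list_of_words)

-- ===== LEMMAS AND PROOFS =====

-- A's loop returns (in .2) exactly the filter by substring membership
theorem pvA_loop (doc : String) (l : List String) (st : Int × List String) :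
    (l.foldl
      (fun (st : Int × List String) word =>
        if PySem.Str.isIn word doc then
          (st.1 + (PySem.Str.count doc word : Int), st.2 ++ [word])
        else st) st).2
      = st.2 ++ l.filter (fun w => PySem.Str.isIn w doc) := by
  induction l generalizing st with
  | nil => simp
  | cons x xs ih =>
    simp only [List.foldl_cons]
    by_cases h : PySem.Str.isIn x doc = true
    · rw [if_pos h, ih]
      dsimp only
      rw [List.filter_cons_of_pos (by simpa using h), List.append_assoc]
      rfl
    · rw [if_neg h, ih, List.filter_cons_of_neg (by simpa using h)]

-- a window of d at position i with the right length, as an infix characterisation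
theorem pvInfix_iff_window (w d : List Char) :
    w <:+: d ↔ ∃ i : Nat, i + w.length ≤ d.length ∧ (d.drop i).take w.length = w := by
  constructor
  · rintro ⟨s, t, rfl⟩
    refine ⟨s.length, by simp, ?_⟩
    simp
  · rintro ⟨i, _, heq⟩
    rw [← heq]
    exact ((List.take_prefix _ _).isInfix).trans (List.drop_suffix i d).isInfix

-- membership in the window set of the word's own length IS substring membership
theorem pvWindowSet_contains (doc w : String) :
    PySem.Set.contains (pvWindowSet doc (PySem.Str.len w)) w = PySem.Str.isIn w doc := by
  rw [Bool.eq_iff_iff, PySem.Set.contains_iff, PySem.Str.isIn_iff_infix, pvWindowSet,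
    PySem.Set.mem_ofList, List.mem_map, pvInfix_iff_window]
  constructor
  · rintro ⟨i, hi, heq⟩
    rw [PySem.List.mem_pyRange_one] at hi
    obtain ⟨h0, hlt⟩ := hi
    have hld := PySem.Str.len_eq doc
    have hlw := PySem.Str.len_eq w
    refine ⟨i.toNat, by omega, ?_⟩
    have hts := congrArg String.toList heq
    rw [PySem.Str.toList_slice, PySem.Chars.slice_eq_listSlice,
      PySem.List.slice_toNat doc.toList h0 (by omega)] at hts
    have h1 : (i + PySem.Str.len w).toNat - i.toNat = w.toList.length := by omega
    rwa [h1] at hts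
  · rintro ⟨i, hle, heq⟩
    have hld := PySem.Str.len_eq doc
    have hlw := PySem.Str.len_eq w
    refine ⟨(i : Int), ?_, ?_⟩
    · rw [PySem.List.mem_pyRange_one]
      omega
    · rw [← String.toList_inj, PySem.Str.toList_slice, PySem.Chars.slice_eq_listSlice,
        PySem.List.slice_toNat doc.toList (by positivity) (by omega)]
      have h1 : ((i : Int) + PySem.Str.len w).toNat - (i : Int).toNat = w.toList.length := by
        omega
      rw [h1, Int.toNat_natCast, heq]

-- The B-side dict fold: invariant (every stored set is the window set of its key)
theorem pvDict_inv (doc : String) (l : List String) (d : PySem.Dict Int (PySem.Set String))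
    (hd : ∀ k, d.get? k = none ∨ d.get? k = some (pvWindowSet doc k)) :
    ∀ k, (l.foldl
      (fun (d : PySem.Dict Int (PySem.Set String)) word =>
        let k : Int := PySem.Str.len word
        if d.contains k then d else d.insert k (pvWindowSet doc k)) d).get? k = none ∨
      (l.foldl
      (fun (d : PySem.Dict Int (PySem.Set String)) word =>
        let k : Int := PySem.Str.len word
        if d.contains k then d else d.insert k (pvWindowSet doc k)) d).get? k
        = some (pvWindowSet doc k) := by
  induction l generalizing d with
  | nil => exact hd
  | cons x xs ih =>
    simp only [List.foldl_cons]
    apply ih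
    intro k
    split_ifs with h
    · exact hd k
    · rw [PySem.Dict.get?_insert]
      by_cases hk : k = PySem.Str.len x
      · rw [if_pos hk]; right; rw [hk]
      · rw [if_neg hk]; exact hd k

-- contains is monotone along the fold
theorem pvDict_mono (doc : String) (l : List String) (d : PySem.Dict Int (PySem.Set String))
    (k : Int) (hk : d.contains k = true) :
    (l.foldl
      (fun (d : PySem.Dict Int (PySem.Set String)) word =>
        let k : Int := PySem.Str.len word
        if d.contains k then d else d.insert k (pvWindowSet doc k)) d).contains k = true := by
  induction l generalizing d with
  | nil => exact hk
  | cons x xs ih =>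
    simp only [List.foldl_cons]
    apply ih
    split_ifs with h
    · exact hk
    · rw [PySem.Dict.contains_insert, hk, Bool.or_true]

-- every word's length is a key of the final dict
theorem pvDict_covers (doc : String) (l : List String) (d : PySem.Dict Int (PySem.Set String))
    (w : String) (hw : w ∈ l) :
    (l.foldl
      (fun (d : PySem.Dict Int (PySem.Set String)) word =>
        let k : Int := PySem.Str.len word
        if d.contains k then d else d.insert k (pvWindowSet doc k)) d).contains
        (PySem.Str.len w) = true := by
  induction l generalizing d with
  | nil => cases hw
  | cons x xs ih =>
    simp only [List.foldl_cons]
    rcases List.mem_cons.mp hw with rfl | hw'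
    · apply pvDict_mono
      split_ifs with h
      · exact h
      · rw [PySem.Dict.contains_insert]
        simp
    · exact ih _ hw'

-- ===== VERDICT (by name: the statement is the Claim_ definition above) =====
theorem find_words_list_spec : Claim_equal_find_words_list := by
  intro document list_of_words _
  unfold Spec_find_words_list find_words_list find_words_list_alt
  simp only []
  rw [pvA_loop, List.nil_append]
  apply List.filter_congr
  intro w hw
  have hcov := pvDict_covers (PySem.Str.replace (PySem.Str.lower document) "_" " ")
    list_of_words PySem.Dict.empty w hw
  have hinv := pvDict_inv (PySem.Str.replace (PySem.Str.lower document) "_" " ")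
    list_of_words PySem.Dict.empty (by intro k; left; exact PySem.Dict.get?_empty k)
    (PySem.Str.len w)
  rcases hinv with hnone | hsome
  · rw [PySem.Dict.contains_eq_isSome_get?, hnone] at hcov; simp at hcov
  · rw [hsome]
    simp only [Option.getD_some]
    exact (pvWindowSet_contains _ w).symm
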